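-- pv_equiv track=rewrite | github.com/mdsefero/PeriMiner | dashboard.py | _apply_boolean_filter
-- ===== SOURCE A (Python) =====
-- def _apply_boolean_filter(matched_ids, subject_term_map, must_have, must_not_have, logic):
--     """Filter matched_ids by per-term must-have / must-not-have logic.
--
--     Args:
--         matched_ids      : iterable of patient IDs to filter
--         subject_term_map : {pid: set(original_search_terms_matched)}
--         must_have        : list/set of terms the patient MUST have matched
--         must_not_have    : list/set of terms the patient must NOT have matched
--         logic            : "ANY" or "ALL" — how must_have terms are combined
--
--     Returns:
--         set of patient IDs passing the filter
--     """
--     must_have     = set(must_have or [])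
--     must_not_have = set(must_not_have or [])
--     if not must_have and not must_not_have:
--         return set(matched_ids)
--     result = set()
--     for pid in matched_ids:
--         terms = subject_term_map.get(pid, set())
--         if must_not_have and (terms & must_not_have):
--             continue
--         if must_have:
--             if logic == "ANY" and not (terms & must_have):
--                 continue
--             if logic == "ALL" and not must_have.issubset(terms):
--                 continue
--         result.add(pid)
--     return result
-- ===== SOURCE B (Python) =====
-- def _apply_boolean_filter(matched_ids, subject_term_map, must_have, must_not_have, logic):
--     """Inverted-index re-implementation: one pass over subject_term_map builds a
--     term -> set(pid) index for the queried terms, then the filter is whole-set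
--     algebra over the term axis."""
--     must_have = list(must_have or [])
--     must_not_have = list(must_not_have or [])
--     if not must_have and not must_not_have:
--         return set(matched_ids)
--     needed = set(must_have) | set(must_not_have)
--     index = {}
--     for pid, terms in subject_term_map.items():
--         for t in terms:
--             if t in needed:
--                 index.setdefault(t, set()).add(pid)
--     candidates = set(matched_ids)
--     if must_not_have:
--         banned = set()
--         for t in set(must_not_have):
--             banned |= index.get(t, set())
--         candidates -= banned
--     if must_have:
--         if logic == "ANY":
--             keep = set()
--             for t in set(must_have):
--                 keep |= index.get(t, set())
--             candidates &= keep
--         elif logic == "ALL":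
--             for t in set(must_have):
--                 candidates &= index.get(t, set())
--     return candidates
-- ===== Notes on version B (the rewrite author's own statement) =====
-- stated objective: alternative
-- what changed: A scans matched_ids and re-tests each patient's term set against every filter term; B builds an inverted index term->set(pids) in one pass over subject_term_map and then applies whole-set algebra (subtract the union of must_not_have index sets, intersect with the union (ANY) or per-term intersection (ALL) of must_have index sets) to set(matched_ids).
import Mathlib
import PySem

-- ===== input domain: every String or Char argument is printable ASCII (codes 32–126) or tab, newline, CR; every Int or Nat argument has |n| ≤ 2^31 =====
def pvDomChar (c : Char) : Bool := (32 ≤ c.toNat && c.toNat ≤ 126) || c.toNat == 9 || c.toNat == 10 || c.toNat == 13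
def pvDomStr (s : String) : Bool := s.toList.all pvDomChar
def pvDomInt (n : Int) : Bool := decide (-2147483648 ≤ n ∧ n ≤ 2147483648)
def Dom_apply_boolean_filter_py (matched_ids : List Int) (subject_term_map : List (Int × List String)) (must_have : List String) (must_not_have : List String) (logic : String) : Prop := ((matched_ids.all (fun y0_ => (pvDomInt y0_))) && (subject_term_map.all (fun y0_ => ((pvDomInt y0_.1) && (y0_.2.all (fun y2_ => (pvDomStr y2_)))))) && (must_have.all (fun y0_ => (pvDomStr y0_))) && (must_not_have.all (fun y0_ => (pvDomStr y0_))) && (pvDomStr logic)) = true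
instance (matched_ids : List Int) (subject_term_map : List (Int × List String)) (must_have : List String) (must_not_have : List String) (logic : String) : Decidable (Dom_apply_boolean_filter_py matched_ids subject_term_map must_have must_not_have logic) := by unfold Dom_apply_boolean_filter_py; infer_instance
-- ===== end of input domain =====

-- B replaces A's per-patient branching scan by an inverted index term -> set(pids) and whole-set algebra over the term axis (objective: alternative decomposition; identical result set).


-- ===== PORT A =====
-- the dict parameter arrives as an assoc list; this decodes it into the Python dict (later value wins) — shared by both ports
def pvBuildDict (subject_term_map : List (Int × List String)) : PySem.Dict Int (List String) :=
  subject_term_map.foldl (fun d p => d.insert p.1 p.2) PySem.Dict.empty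

def apply_boolean_filter_py (matched_ids : List Int) (subject_term_map : List (Int × List String)) (must_have : List String) (must_not_have : List String) (logic : String) : List Int :=
  let d := pvBuildDict subject_term_map
  let mh : PySem.Set String := PySem.Set.ofList must_have
  let mnh : PySem.Set String := PySem.Set.ofList must_not_have
  if mh.isEmpty && mnh.isEmpty then PySem.Set.ofList matched_ids
  else
    matched_ids.foldl (fun result pid =>
      let terms : PySem.Set String := (d.get? pid).getD PySem.Set.empty
      if !mnh.isEmpty && !(PySem.Set.inter terms mnh).isEmpty then result
      else if !mh.isEmpty && logic == "ANY" && (PySem.Set.inter terms mh).isEmpty then result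
      else if !mh.isEmpty && logic == "ALL" && !(PySem.Set.issubset mh terms) then result
      else PySem.Set.add result pid) PySem.Set.empty

-- ===== PORT B =====
-- inverted index, restricted to the queried terms: term -> set of pids having that term
def pvIndex (needed : PySem.Set String) (d : PySem.Dict Int (List String)) : PySem.Dict String (PySem.Set Int) :=
  d.items.foldl (fun idx pr =>
    pr.2.foldl (fun idx t =>
      if needed.contains t then
        idx.insert t (PySem.Set.add (idx.getD t PySem.Set.empty) pr.1)
      else idx) idx) PySem.Dict.empty

def apply_boolean_filter_py_alt (matched_ids : List Int) (subject_term_map : List (Int × List String)) (must_have : List String) (must_not_have : List String) (logic : String) : List Int :=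
  if must_have.isEmpty && must_not_have.isEmpty then PySem.Set.ofList matched_ids
  else
    let needed := PySem.Set.union (PySem.Set.ofList must_have) (PySem.Set.ofList must_not_have)
    let index := pvIndex needed (pvBuildDict subject_term_map)
    let candidates : PySem.Set Int := PySem.Set.ofList matched_ids
    let candidates :=
      if must_not_have.isEmpty then candidates
      else
        let banned := (PySem.Set.ofList must_not_have).foldl
          (fun b t => PySem.Set.union b (index.getD t PySem.Set.empty)) PySem.Set.empty
        PySem.Set.diff candidates banned
    let candidates :=
      if must_have.isEmpty then candidates
      else if logic == "ANY" then
        let keep := (PySem.Set.ofList must_have).foldl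
          (fun k t => PySem.Set.union k (index.getD t PySem.Set.empty)) PySem.Set.empty
        PySem.Set.inter candidates keep
      else if logic == "ALL" then
        (PySem.Set.ofList must_have).foldl (fun c t => PySem.Set.inter c (index.getD t PySem.Set.empty)) candidates
      else candidates
    candidates

-- ===== PRECONDITION & SPEC =====
def Spec_apply_boolean_filter_py (matched_ids : List Int) (subject_term_map : List (Int × List String)) (must_have : List String) (must_not_have : List String) (logic : String) (out : List Int) : Prop := out = apply_boolean_filter_py_alt matched_ids subject_term_map must_have must_not_have logic
instance (matched_ids : List Int) (subject_term_map : List (Int × List String)) (must_have : List String) (must_not_have : List String) (logic : String) (out : List Int) : Decidable (Spec_apply_boolean_filter_py matched_ids subject_term_map must_have must_not_have logic out) := by unfold Spec_apply_boolean_filter_py; infer_instance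

-- ===== CLAIM (what is proved, stated in full; the proofs are below) =====
def Claim_equal_apply_boolean_filter_py : Prop := ∀ (matched_ids : List Int) (subject_term_map : List (Int × List String)) (must_have : List String) (must_not_have : List String) (logic : String), Dom_apply_boolean_filter_py matched_ids subject_term_map must_have must_not_have logic → Spec_apply_boolean_filter_py matched_ids subject_term_map must_have must_not_have logic (apply_boolean_filter_py matched_ids subject_term_map must_have must_not_have logic)

-- ===== LEMMAS AND PROOFS =====

-- A's per-patient keep condition, as a predicate on pids
def pvKeep (d : PySem.Dict Int (List String)) (must_have must_not_have : List String) (logic : String) (pid : Int) : Bool :=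
  let terms : PySem.Set String := (d.get? pid).getD PySem.Set.empty
  !(!must_not_have.isEmpty && !(PySem.Set.inter terms (PySem.Set.ofList must_not_have)).isEmpty) &&
  (!(!must_have.isEmpty && logic == "ANY" && (PySem.Set.inter terms (PySem.Set.ofList must_have)).isEmpty) &&
   !(!must_have.isEmpty && logic == "ALL" && !(PySem.Set.issubset (PySem.Set.ofList must_have) terms)))

lemma pv_mem_inner (needed : PySem.Set String) (pid p : Int) (t : String) :
    ∀ (ts : List String) (idx : PySem.Dict String (PySem.Set Int)),
    (p ∈ (ts.foldl (fun idx t' =>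
        if needed.contains t' then
          idx.insert t' (PySem.Set.add (idx.getD t' PySem.Set.empty) pid)
        else idx) idx).getD t PySem.Set.empty
      ↔ p ∈ idx.getD t PySem.Set.empty ∨ (p = pid ∧ t ∈ ts ∧ needed.contains t)) := by
  intro ts
  induction ts with
  | nil => simp
  | cons h tl ih =>
    intro idx
    by_cases hn : needed.contains h = true
    · simp only [List.foldl_cons, hn, if_true, ih, PySem.Dict.getD_insert]
      by_cases ht : t = h
      · subst ht
        have hn' : t ∈ needed := by simpa using hn
        simp [PySem.Set.mem_add, hn']
        tauto
      · simp [ht]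
    · simp only [List.foldl_cons, hn, Bool.false_eq_true, if_false, ih]
      by_cases ht : t = h
      · subst ht
        have hn' : t ∉ needed := by simpa using hn
        simp [hn']
      · simp [ht]

lemma pv_mem_outer (needed : PySem.Set String) (p : Int) (t : String) :
    ∀ (items : List (Int × List String)) (idx : PySem.Dict String (PySem.Set Int)),
    (p ∈ (items.foldl (fun idx pr =>
        pr.2.foldl (fun idx t' =>
          if needed.contains t' then
            idx.insert t' (PySem.Set.add (idx.getD t' PySem.Set.empty) pr.1)
          else idx) idx) idx).getD t PySem.Set.empty
      ↔ p ∈ idx.getD t PySem.Set.empty ∨ (needed.contains t = true ∧ ∃ pr ∈ items, pr.1 = p ∧ t ∈ pr.2)) := by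
  intro items
  induction items with
  | nil => simp
  | cons h tl ih =>
    intro idx
    simp only [List.foldl_cons, ih, pv_mem_inner]
    constructor
    · rintro (⟨h1 | ⟨rfl, h2, h3⟩⟩ | ⟨hc, pr, hpr, h3, h4⟩)
      · exact Or.inl h1
      · exact Or.inr ⟨h3, h, by simp, rfl, h2⟩
      · exact Or.inr ⟨hc, pr, by simp [hpr], h3, h4⟩
    · rintro (h1 | ⟨hc, pr, hpr, h3, h4⟩)
      · exact Or.inl (Or.inl h1)
      · rcases List.mem_cons.1 hpr with rfl | hmem
        · exact Or.inl (Or.inr ⟨h3.symm, h4, hc⟩)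
        · exact Or.inr ⟨hc, pr, hmem, h3, h4⟩

-- with nodup keys, "some item with key p contains t" is exactly "t is in the looked-up value"
lemma pv_get?_char (d : PySem.Dict Int (List String)) (hk : d.keys.Nodup) (p : Int) (t : String) :
    ((∃ pr ∈ d.items, pr.1 = p ∧ t ∈ pr.2) ↔ t ∈ (d.get? p).getD []) := by
  constructor
  · rintro ⟨pr, hpr, rfl, ht⟩
    have hsome : (d.items.find? (fun q => q.1 == pr.1)).isSome := by
      apply List.find?_isSome.2
      exact ⟨pr, hpr, by simp⟩
    rcases Option.isSome_iff_exists.1 hsome with ⟨qr, hq⟩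
    have hqmem := List.mem_of_find?_eq_some hq
    have hqkey := List.find?_some hq
    have : qr = pr := by
      have hk' : (d.items.map Prod.fst).Nodup := by simpa [PySem.Dict.keys] using hk
      exact List.inj_on_of_nodup_map hk' hqmem hpr (by simpa using hqkey)
    simp [PySem.Dict.get?, hq, this, ht]
  · intro ht
    rcases hfind : d.items.find? (fun q => q.1 == p) with _ | qr
    · simp [PySem.Dict.get?, hfind] at ht
    · have hqmem := List.mem_of_find?_eq_some hfind
      have hqkey := List.find?_some hfind
      refine ⟨qr, hqmem, by simpa using hqkey, ?_⟩
      simpa [PySem.Dict.get?, hfind] using ht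

lemma pv_nodup_keys (stm : List (Int × List String)) : (pvBuildDict stm).keys.Nodup := by
  unfold pvBuildDict
  exact PySem.Dict.nodup_keys_foldl_insert_key stm Prod.fst (fun _ p => p.2) PySem.Dict.empty (by simp [PySem.Dict.keys, PySem.Dict.empty])

lemma pv_idx_char (needed : PySem.Set String) (stm : List (Int × List String)) (p : Int) (t : String) :
    (p ∈ (pvIndex needed (pvBuildDict stm)).getD t ([] : PySem.Set Int)
      ↔ needed.contains t = true ∧ t ∈ ((pvBuildDict stm).get? p).getD []) := by
  unfold pvIndex
  refine Iff.trans (pv_mem_outer needed p t (PySem.Dict.items (pvBuildDict stm)) PySem.Dict.empty) ?_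
  have hempty : (p ∈ (PySem.Dict.empty : PySem.Dict String (PySem.Set Int)).getD t PySem.Set.empty) ↔ False := by
    simp [PySem.Dict.getD, PySem.Dict.get?, PySem.Dict.empty]
  rw [hempty, false_or]
  exact and_congr_right fun _ => pv_get?_char (pvBuildDict stm) (pv_nodup_keys stm) p t

lemma pv_filter_add (P : Int → Bool) (s : PySem.Set Int) (x : Int) :
    List.filter P (PySem.Set.add s x)
      = if P x then PySem.Set.add (List.filter P s) x else List.filter P s := by
  rw [PySem.Set.add_eq_ite, PySem.Set.add_eq_ite]
  by_cases hx : x ∈ s <;> by_cases hp : P x <;>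
    simp [hx, hp, List.filter_append, List.mem_filter]

lemma pv_foldl_addIf (P : Int → Bool) :
    ∀ (ms : List Int) (s : PySem.Set Int),
    ms.foldl (fun res pid => if P pid then PySem.Set.add res pid else res) (List.filter P s)
      = List.filter P (PySem.Set.update s ms) := by
  intro ms
  induction ms with
  | nil => simp [PySem.Set.update]
  | cons x xs ih =>
    intro s
    rw [PySem.Set.update_cons, ← ih (PySem.Set.add s x), List.foldl_cons, pv_filter_add]

lemma pv_mem_foldl_union (g : String → PySem.Set Int) (p : Int) :
    ∀ (ts : List String) (acc : PySem.Set Int),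
    (p ∈ ts.foldl (fun b t => PySem.Set.union b (g t)) acc ↔ p ∈ acc ∨ ∃ t ∈ ts, p ∈ g t) := by
  intro ts
  induction ts with
  | nil => simp
  | cons h tl ih =>
    intro acc
    simp only [List.foldl_cons, ih, PySem.Set.mem_union]
    constructor
    · rintro (⟨h1 | h2⟩ | ⟨t, htl, hg⟩)
      · exact Or.inl h1
      · exact Or.inr ⟨h, by simp, h2⟩
      · exact Or.inr ⟨t, by simp [htl], hg⟩
    · rintro (h1 | ⟨t, ht, hg⟩)
      · exact Or.inl (Or.inl h1)
      · rcases List.mem_cons.1 ht with rfl | hmem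
        · exact Or.inl (Or.inr hg)
        · exact Or.inr ⟨t, hmem, hg⟩

lemma pv_foldl_inter (g : String → PySem.Set Int) :
    ∀ (ts : List String) (c : PySem.Set Int),
    ts.foldl (fun c t => PySem.Set.inter c (g t)) c
      = List.filter (fun p => ts.all (fun t => (g t).contains p)) c := by
  intro ts
  induction ts with
  | nil => simp
  | cons h tl ih =>
    intro c
    rw [List.foldl_cons, ih]
    show List.filter _ (List.filter _ c) = _
    rw [List.filter_filter]
    apply List.filter_congr
    intro p _
    simp [Bool.and_comm]

lemma pv_isEmpty_ofList {α : Type} [BEq α] [LawfulBEq α] (xs : List α) :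
    (PySem.Set.ofList xs).isEmpty = xs.isEmpty := by
  cases xs with
  | nil => rfl
  | cons x xs => rw [PySem.Set.ofList_cons]; rfl

-- A's fold is a filter of set(matched_ids) by pvKeep
lemma pv_A_filter (d : PySem.Dict Int (List String)) (mh mnh : List String) (logic : String)
    (ids : List Int) :
    ids.foldl (fun result pid =>
      if !mnh.isEmpty && !(PySem.Set.inter ((d.get? pid).getD PySem.Set.empty) (PySem.Set.ofList mnh)).isEmpty then result
      else if !mh.isEmpty && logic == "ANY" && (PySem.Set.inter ((d.get? pid).getD PySem.Set.empty) (PySem.Set.ofList mh)).isEmpty then result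
      else if !mh.isEmpty && logic == "ALL" && !(PySem.Set.issubset (PySem.Set.ofList mh) ((d.get? pid).getD PySem.Set.empty)) then result
      else PySem.Set.add result pid) PySem.Set.empty
    = List.filter (pvKeep d mh mnh logic) (PySem.Set.ofList ids) := by
  have pv_if3 : ∀ (b1 b2 b3 : Bool) (r x : PySem.Set Int),
      (if b1 then r else if b2 then r else if b3 then r else x)
        = if !b1 && (!b2 && !b3) then x else r := by
    intro b1 b2 b3 r x
    cases b1 <;> cases b2 <;> cases b3 <;> simp
  have hfun : (fun (result : PySem.Set Int) (pid : Int) =>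
      if !mnh.isEmpty && !(PySem.Set.inter ((d.get? pid).getD PySem.Set.empty) (PySem.Set.ofList mnh)).isEmpty then result
      else if !mh.isEmpty && logic == "ANY" && (PySem.Set.inter ((d.get? pid).getD PySem.Set.empty) (PySem.Set.ofList mh)).isEmpty then result
      else if !mh.isEmpty && logic == "ALL" && !(PySem.Set.issubset (PySem.Set.ofList mh) ((d.get? pid).getD PySem.Set.empty)) then result
      else PySem.Set.add result pid)
      = (fun result pid => if pvKeep d mh mnh logic pid then PySem.Set.add result pid else result) := by
    funext result pid
    rw [pv_if3]
    rfl
  rw [hfun]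
  have h := pv_foldl_addIf (pvKeep d mh mnh logic) ids []
  simpa [PySem.Set.update_nil_left] using h

theorem pv_main (ids : List Int) (stm : List (Int × List String)) (mh mnh : List String) (logic : String) :
    apply_boolean_filter_py ids stm mh mnh logic = apply_boolean_filter_py_alt ids stm mh mnh logic := by
  by_cases hemp : (mh.isEmpty && mnh.isEmpty) = true
  · simp only [apply_boolean_filter_py, apply_boolean_filter_py_alt, pv_isEmpty_ofList, hemp, if_true]
  · rw [Bool.not_eq_true] at hemp
    simp only [apply_boolean_filter_py, apply_boolean_filter_py_alt, pv_isEmpty_ofList, hemp,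
      Bool.false_eq_true, if_false]
    rw [pv_A_filter]
    by_cases hmh : mh.isEmpty = true
    · have hmnh : mnh.isEmpty = false := by rw [hmh] at hemp; simpa using hemp
      simp only [hmh, hmnh, if_true, Bool.false_eq_true, if_false, PySem.Set.diff]
      apply List.filter_congr
      intro p _
      rw [Bool.eq_iff_iff]
      simp [pvKeep, hmh, hmnh, PySem.Set.inter, List.isEmpty_iff, List.filter_eq_nil_iff,
        PySem.Set.mem_ofList, pv_mem_foldl_union, pv_idx_char]
      aesop
    · simp only [hmh, Bool.false_eq_true, if_false]
      by_cases hany : (logic == "ANY") = true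
      · have hlog : logic = "ANY" := by simpa using hany
        subst hlog
        by_cases hmnh : mnh.isEmpty = true
        · simp only [hany, hmnh, if_true, PySem.Set.inter]
          apply List.filter_congr
          intro p _
          rw [Bool.eq_iff_iff]
          simp [pvKeep, hmh, hmnh, PySem.Set.inter, List.filter_eq_nil_iff,
            PySem.Set.mem_ofList, pv_mem_foldl_union, pv_idx_char]
          tauto
        · simp only [hany, hmnh, if_true, Bool.false_eq_true, if_false, PySem.Set.inter, PySem.Set.diff]
          rw [List.filter_filter]
          apply List.filter_congr
          intro p _
          rw [Bool.eq_iff_iff]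
          simp [pvKeep, hmh, hmnh, PySem.Set.inter, List.isEmpty_iff, List.filter_eq_nil_iff,
            PySem.Set.mem_ofList, pv_mem_foldl_union, pv_idx_char]
          aesop
      · by_cases hall : (logic == "ALL") = true
        · have hlog : logic = "ALL" := by simpa using hall
          subst hlog
          by_cases hmnh : mnh.isEmpty = true
          · simp only [hall, hany, hmnh, if_true, Bool.false_eq_true, if_false]
            rw [pv_foldl_inter]
            apply List.filter_congr
            intro p _
            rw [Bool.eq_iff_iff]
            simp [pvKeep, hmh, hmnh, PySem.Set.inter,
              PySem.Set.mem_ofList, PySem.Set.issubset_iff,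
              pv_idx_char]
            exact ⟨fun h x hx => ⟨Or.inl hx, h x hx⟩, fun h x hx => (h x hx).2⟩
          · simp only [hall, hany, hmnh, if_true, Bool.false_eq_true, if_false, PySem.Set.diff]
            rw [pv_foldl_inter, List.filter_filter]
            apply List.filter_congr
            intro p _
            rw [Bool.eq_iff_iff]
            simp [pvKeep, hmh, hmnh, PySem.Set.inter, List.isEmpty_iff, List.filter_eq_nil_iff,
              PySem.Set.mem_ofList, PySem.Set.issubset_iff,
              pv_mem_foldl_union, pv_idx_char]
            aesop
        · by_cases hmnh : mnh.isEmpty = true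
          · simp only [hany, hall, hmnh, if_true, Bool.false_eq_true, if_false]
            apply List.filter_eq_self.2
            intro p _
            simp [pvKeep, hmnh, hany, hall]
          · simp only [hany, hall, hmnh, Bool.false_eq_true, if_false, PySem.Set.diff]
            apply List.filter_congr
            intro p _
            rw [Bool.eq_iff_iff]
            simp [pvKeep, hmh, hmnh, hany, hall, PySem.Set.inter, List.isEmpty_iff,
              List.filter_eq_nil_iff, PySem.Set.mem_ofList,
              pv_mem_foldl_union, pv_idx_char]
            aesop

-- ===== VERDICT (by name: the statement is the Claim_ definition above) =====
theorem apply_boolean_filter_py_spec : Claim_equal_apply_boolean_filter_py := by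
  intro ids stm mh mnh logic _
  unfold Spec_apply_boolean_filter_py
  exact pv_main ids stm mh mnh logic
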